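-- pv_equiv track=rewrite | github.com/drmingdrmer/homefolder | xp/bash-d/plugin/photo-org/bin/dedup.py | diff
-- ===== SOURCE A (Python) =====
-- def diff(a, b):
--     diffmap = {
--     }
--
--     for ia in range(len(a)+1):
--
--         for ib in range(len(b)+1):
--
--             k = (ia, ib)
--             if ia == 0:
--                 # largest subarray, unmatched chars, change list for a and b
--                 diffmap[k] = (0, '', b[:ib], (), ())
--             elif ib == 0:
--                 diffmap[k] = (0, a[:ia], '', (), ())
--             else:
--
--                 ca = a[ia-1]
--                 cb = b[ib-1]
--                 prev = diffmap[(ia-1, ib-1)]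
--                 pa = diffmap[(ia-1, ib)]
--                 pb = diffmap[(ia, ib-1)]
--
--                 if ca == cb:
--                     if pa[0] == prev[0] + 1 and pb[0] < prev[0] + 1:
--                         diffmap[k] = (pa[0], pa[1] + ca, pa[2],
--                                       pa[3] + (ia-1,), pa[4])
--
--                     elif pb[0] == prev[0] + 1 and pa[0] < prev[0] + 1:
--                         diffmap[k] = (pb[0], pb[1], pb[2] + cb,
--                                       pb[3], pb[4] + (ib-1,), )
--
--                     else:
--                         diffmap[k] = (prev[0]+1, prev[1], prev[2],
--                                       prev[3], prev[4] )
--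
--                 else:
--
--                     if pa[0] > pb[0]:
--                         diffmap[k] = (pa[0], pa[1] + ca, pa[2],
--                                       pa[3] + (ia-1,), pa[4])
--
--                     elif pa[0] < pb[0]:
--                         diffmap[k] = (pb[0], pb[1], pb[2] + cb,
--                                       pb[3], pb[4] + (ib-1,), )
--
--                     else:
--                         # prefer equal length matching
--                         if ia - 1 >= ib:
--                             diffmap[k] = (pa[0], pa[1] + ca, pa[2],
--                                           pa[3] + (ia-1,), pa[4])
--                         else:
--                             diffmap[k] = (pb[0], pb[1], pb[2] + cb,
--                                           pb[3], pb[4] + (ib-1,), )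
--
--             # print repr(a[:ia])
--             # print repr(b[:ib])
--             # print diffmap[k]
--
--
--     return diffmap[(len(a)-1, len(b)-1)]
-- ===== SOURCE B (Python) =====
-- def diff(a, b):
--     # Length-only DP over the prefixes the original actually returns (up to len-1 of
--     # each string), then a single backtrace with the same tie-break rules reconstructs
--     # the matched substrings and change-index lists.
--     n = len(a) - 1
--     m = len(b) - 1
--     L = []
--     for i in range(n + 1):
--         row = []
--         for j in range(m + 1):
--             if i == 0 or j == 0:
--                 row.append(0)
--             elif a[i - 1] == b[j - 1]:
--                 row.append(L[i - 1][j - 1] + 1)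
--             else:
--                 x = L[i - 1][j]
--                 y = row[j - 1]
--                 row.append(x if x > y else y)
--         L.append(row)
--     sa = []
--     sb = []
--     xa = []
--     xb = []
--     i, j = n, m
--     while i > 0 and j > 0:
--         diag = L[i - 1][j - 1]
--         up = L[i - 1][j]
--         left = L[i][j - 1]
--         if a[i - 1] == b[j - 1]:
--             if up == diag + 1 and left < diag + 1:
--                 go_up = True
--             elif left == diag + 1 and up < diag + 1:
--                 go_up = False
--             else:
--                 i -= 1
--                 j -= 1
--                 continue
--         else:
--             if up > left:
--                 go_up = True
--             elif up < left:
--                 go_up = False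
--             else:
--                 go_up = i - 1 >= j
--         if go_up:
--             sa.append(a[i - 1])
--             xa.append(i - 1)
--             i -= 1
--         else:
--             sb.append(b[j - 1])
--             xb.append(j - 1)
--             j -= 1
--     if i == 0:
--         sb.extend(reversed(b[:j]))
--     else:
--         sa.extend(reversed(a[:i]))
--     sa.reverse()
--     sb.reverse()
--     xa.reverse()
--     xb.reverse()
--     return (L[n][m], ''.join(sa), ''.join(sb), tuple(xa), tuple(xb))
-- ===== Notes on version B (the rewrite author's own statement) =====
-- stated objective: faster
-- what changed: A builds an O(n*m) table whose every cell carries the full (length, unmatched-substring, unmatched-substring, index-tuple, index-tuple) answer, copying strings and tuples at each cell; B fills a length-only DP table and then reconstructs the strings and index lists in a single backtrace that replays A's exact tie-break rules.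
import Mathlib
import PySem

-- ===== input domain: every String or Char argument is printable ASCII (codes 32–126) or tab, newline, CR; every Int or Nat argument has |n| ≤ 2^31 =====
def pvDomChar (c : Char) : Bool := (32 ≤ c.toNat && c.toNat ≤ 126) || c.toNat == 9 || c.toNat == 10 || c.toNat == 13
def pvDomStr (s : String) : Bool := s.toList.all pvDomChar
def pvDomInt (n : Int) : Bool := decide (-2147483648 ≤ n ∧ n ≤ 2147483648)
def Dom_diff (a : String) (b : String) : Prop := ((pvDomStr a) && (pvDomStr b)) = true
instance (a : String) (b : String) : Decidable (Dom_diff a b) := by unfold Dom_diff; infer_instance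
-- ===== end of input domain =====

-- B replaces A's table of (length, strings, index-tuples) tuples by a length-only DP table
-- plus one backtrace with the same tie-break rules (objective: faster).

-- ===== PORT A =====

-- A fills its dict with the double loop
-- `for ia in range(len(a)+1): for ib in range(len(b)+1): diffmap[(ia,ib)] = <value>`;
-- `pvTab` is that loop, with the value computed in the body as a parameter.
def pvVal {ν : Type} (vA vB : Nat → ν) (comb : Nat → Nat → ν → ν → ν → ν) (dflt : ν)
    (d : PySem.Dict (Nat × Nat) ν) (ia ib : Nat) : ν :=
  if ia = 0 then vA ib
  else if ib = 0 then vB ia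
  else comb ia ib (d.getD (ia - 1, ib - 1) dflt) (d.getD (ia - 1, ib) dflt) (d.getD (ia, ib - 1) dflt)

def pvTab {ν : Type} (vA vB : Nat → ν) (comb : Nat → Nat → ν → ν → ν → ν) (dflt : ν)
    (n m : Nat) : PySem.Dict (Nat × Nat) ν :=
  (List.range (n + 1)).foldl
    (fun d ia => (List.range (m + 1)).foldl
      (fun d ib => d.insert (ia, ib) (pvVal vA vB comb dflt d ia ib)) d)
    PySem.Dict.empty

-- the branch cascade of A's inner loop body (ca == cb / tie-breaking), verbatim
def aComb (ca cb : Char) (ia ib : Nat)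
    (prev pa pb : Int × String × String × List Int × List Int) :
    Int × String × String × List Int × List Int :=
  match prev, pa, pb with
  | (pl, ps, pt, px, py), (al, sa, ta, xa, ya), (bl, sb, tb, xb, yb) =>
    if ca = cb then
      if al = pl + 1 ∧ bl < pl + 1 then (al, sa.push ca, ta, xa ++ [(ia : Int) - 1], ya)
      else if bl = pl + 1 ∧ al < pl + 1 then (bl, sb, tb.push cb, xb, yb ++ [(ib : Int) - 1])
      else (pl + 1, ps, pt, px, py)
    else
      if al > bl then (al, sa.push ca, ta, xa ++ [(ia : Int) - 1], ya)
      else if al < bl then (bl, sb, tb.push cb, xb, yb ++ [(ib : Int) - 1])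
      else
        if (ia : Int) - 1 ≥ (ib : Int) then (al, sa.push ca, ta, xa ++ [(ia : Int) - 1], ya)
        else (bl, sb, tb.push cb, xb, yb ++ [(ib : Int) - 1])

def diff (a : String) (b : String) : Int × String × String × List Int × List Int :=
  let la := a.toList
  let lb := b.toList
  let dm := pvTab
    (fun ib => (0, "", String.ofList (lb.take ib), [], []))
    (fun ia => (0, String.ofList (la.take ia), "", [], []))
    (fun ia ib prev pa pb => aComb (la.getD (ia - 1) ' ') (lb.getD (ib - 1) ' ') ia ib prev pa pb)
    (0, "", "", [], []) la.length lb.length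
  -- Python: return diffmap[(len(a)-1, len(b)-1)]; KeyError (excluded by Pre_) when a or b is empty
  dm.getD (la.length - 1, lb.length - 1) (0, "", "", [], [])

-- ===== PORT B =====

-- B's DP table: list of rows of ints, each row built by appends, exactly as Source B
def bVal (la lb : List Char) (L : List (List Int)) (row : List Int) (i j : Nat) : Int :=
  if i = 0 ∨ j = 0 then 0
  else if la.getD (i - 1) ' ' = lb.getD (j - 1) ' ' then (L.getD (i - 1) []).getD (j - 1) 0 + 1
  else
    let x := (L.getD (i - 1) []).getD j 0
    let y := row.getD (j - 1) 0
    if x > y then x else y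

def bRow (la lb : List Char) (m : Nat) (L : List (List Int)) (i : Nat) : List Int :=
  (List.range (m + 1)).foldl (fun row j => row ++ [bVal la lb L row i j]) []

def bTab (la lb : List Char) (n m : Nat) : List (List Int) :=
  (List.range (n + 1)).foldl (fun L i => L ++ [bRow la lb m L i]) []

-- B's backtrace: the while-loop, with the accumulating lists appended at the back
-- exactly as the Python appends, returning the final loop state
def btloop (la lb : List Char) (L : List (List Int)) :
    Nat → Nat → List Char → List Char → List Int → List Int →
      Nat × Nat × List Char × List Char × List Int × List Int
  | 0, j, sa, sb, xa, xb => (0, j, sa, sb, xa, xb)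
  | i + 1, 0, sa, sb, xa, xb => (i + 1, 0, sa, sb, xa, xb)
  | i + 1, j + 1, sa, sb, xa, xb =>
    let diag := (L.getD i []).getD j 0
    let up := (L.getD i []).getD (j + 1) 0
    let left := (L.getD (i + 1) []).getD j 0
    let ca := la.getD i ' '
    let cb := lb.getD j ' '
    if ca = cb then
      if up = diag + 1 ∧ left < diag + 1 then
        btloop la lb L i (j + 1) (sa ++ [ca]) sb (xa ++ [(i : Int)]) xb
      else if left = diag + 1 ∧ up < diag + 1 then
        btloop la lb L (i + 1) j sa (sb ++ [cb]) xa (xb ++ [(j : Int)])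
      else
        btloop la lb L i j sa sb xa xb
    else
      if up > left then
        btloop la lb L i (j + 1) (sa ++ [ca]) sb (xa ++ [(i : Int)]) xb
      else if up < left then
        btloop la lb L (i + 1) j sa (sb ++ [cb]) xa (xb ++ [(j : Int)])
      else
        if j + 1 ≤ i then
          btloop la lb L i (j + 1) (sa ++ [ca]) sb (xa ++ [(i : Int)]) xb
        else
          btloop la lb L (i + 1) j sa (sb ++ [cb]) xa (xb ++ [(j : Int)])
  termination_by i j _ _ _ _ => i + j

-- B's epilogue after the while loop: extend with the unmatched prefix, reverse everything
def btFin (la lb : List Char)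
    (r : Nat × Nat × List Char × List Char × List Int × List Int) :
    List Char × List Char × List Int × List Int :=
  match r with
  | (i, j, sa, sb, xa, xb) =>
    ((if i = 0 then sa else sa ++ (la.take i).reverse).reverse,
     (if i = 0 then sb ++ (lb.take j).reverse else sb).reverse,
     xa.reverse, xb.reverse)

def diff_alt (a : String) (b : String) : Int × String × String × List Int × List Int :=
  let la := a.toList
  let lb := b.toList
  let n := la.length - 1
  let m := lb.length - 1
  let L := bTab la lb n m
  match btFin la lb (btloop la lb L n m [] [] [] []) with
  | (sa, sb, xa, xb) => ((L.getD n []).getD m 0, String.ofList sa, String.ofList sb, xa, xb)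

-- ===== PRECONDITION & SPEC =====
-- Pre_ excludes exactly the inputs where A raises: with a or b empty the final lookup
-- diffmap[(len(a)-1, len(b)-1)] is a KeyError (B raises KeyError there too).
def Pre_diff (a : String) (b : String) : Prop := a ≠ "" ∧ b ≠ ""
instance (a : String) (b : String) : Decidable (Pre_diff a b) := by unfold Pre_diff; infer_instance
def pvWitness_diff : String × String := ("abcb", "bca")

def Spec_diff (a : String) (b : String) (out : Int × String × String × List Int × List Int) : Prop := out = diff_alt a b
instance (a : String) (b : String) (out : Int × String × String × List Int × List Int) : Decidable (Spec_diff a b out) := by unfold Spec_diff; infer_instance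

-- ===== CLAIM (what is proved, stated in full; the proofs are below) =====
def Claim_equal_diff : Prop := ∀ (a : String) (b : String), Dom_diff a b → Pre_diff a b → Spec_diff a b (diff a b)

-- ===== LEMMAS AND PROOFS =====

-- the recurrence the table satisfies, as a plain recursive function
def pvCell {ν : Type} (vA vB : Nat → ν) (comb : Nat → Nat → ν → ν → ν → ν) (ia ib : Nat) : ν :=
  if ia = 0 then vA ib
  else if ib = 0 then vB ia
  else comb ia ib (pvCell vA vB comb (ia - 1) (ib - 1)) (pvCell vA vB comb (ia - 1) ib)
    (pvCell vA vB comb ia (ib - 1))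
  termination_by ia + ib
  decreasing_by all_goals omega

-- one row of the table loop keeps and extends the invariant
theorem pvRow_getD {ν : Type} (vA vB : Nat → ν) (comb : Nat → Nat → ν → ν → ν → ν) (dflt : ν)
    (m ia : Nat) : ∀ (k : Nat) (d : PySem.Dict (Nat × Nat) ν), k ≤ m + 1 →
    (∀ p q, p < ia → q ≤ m → d.getD (p, q) dflt = pvCell vA vB comb p q) →
    ∀ p q, (p < ia ∧ q ≤ m) ∨ (p = ia ∧ q < k) →
    ((List.range k).foldl (fun d ib => d.insert (ia, ib) (pvVal vA vB comb dflt d ia ib)) d).getD (p, q) dflt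
      = pvCell vA vB comb p q := by
  intro k
  induction k with
  | zero =>
    intro d _ hd p q hpq
    rcases hpq with ⟨h1, h2⟩ | ⟨_, h⟩
    · simpa using hd p q h1 h2
    · omega
  | succ k ih =>
    intro d hk hd p q hpq
    rw [List.range_succ, List.foldl_append, List.foldl_cons, List.foldl_nil,
      PySem.Dict.getD_insert]
    by_cases hpq2 : (p, q) = (ia, k)
    · rw [if_pos hpq2]
      obtain ⟨hp, hq⟩ := Prod.mk.injEq .. ▸ hpq2
      subst hp; subst hq
      rw [pvVal]
      by_cases hia : p = 0
      · rw [if_pos hia]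
        conv_rhs => rw [pvCell]
        simp [hia]
      · rw [if_neg hia]
        by_cases hk0 : q = 0
        · rw [if_pos hk0]
          conv_rhs => rw [pvCell]
          simp [hia, hk0]
        · rw [if_neg hk0]
          rw [ih d (by omega) hd (p - 1) (q - 1) (Or.inl ⟨by omega, by omega⟩),
            ih d (by omega) hd (p - 1) q (Or.inl ⟨by omega, by omega⟩),
            ih d (by omega) hd p (q - 1) (Or.inr ⟨rfl, by omega⟩)]
          conv_rhs => rw [pvCell]
          rw [if_neg hia, if_neg hk0]
    · rw [if_neg hpq2]
      apply ih d (by omega) hd p q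
      rcases hpq with h | ⟨hp, hq⟩
      · exact Or.inl h
      · refine Or.inr ⟨hp, ?_⟩
        have : q ≠ k := fun h => hpq2 (by rw [hp, h])
        omega
theorem pvTab_getD {ν : Type} (vA vB : Nat → ν) (comb : Nat → Nat → ν → ν → ν → ν) (dflt : ν)
    (n m : Nat) (i j : Nat) (hi : i ≤ n) (hj : j ≤ m) :
    (pvTab vA vB comb dflt n m).getD (i, j) dflt = pvCell vA vB comb i j := by
  unfold pvTab
  have main : ∀ (r : Nat) (p q : Nat), p < r → q ≤ m →
      ((List.range r).foldl
        (fun d ia => (List.range (m + 1)).foldl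
          (fun d ib => d.insert (ia, ib) (pvVal vA vB comb dflt d ia ib)) d)
        PySem.Dict.empty).getD (p, q) dflt = pvCell vA vB comb p q := by
    intro r
    induction r with
    | zero => intro p q hp _; omega
    | succ r ih =>
      intro p q hp hq
      rw [show List.range (r + 1) = List.range r ++ [r] from List.range_succ,
        List.foldl_append, List.foldl_cons, List.foldl_nil]
      refine pvRow_getD vA vB comb dflt m r (m + 1) _ (le_refl _) (fun p q hp hq => ih p q hp hq) p q ?_
      by_cases hpr : p < r
      · exact Or.inl ⟨hpr, hq⟩
      · exact Or.inr ⟨by omega, by omega⟩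
  exact main (n + 1) i j (by omega) hj

-- A's cell value / B's cell value as functions of the index pair
def cellA (la lb : List Char) : Nat → Nat → Int × String × String × List Int × List Int :=
  pvCell (fun ib => (0, "", String.ofList (lb.take ib), [], []))
    (fun ia => (0, String.ofList (la.take ia), "", [], []))
    (fun ia ib prev pa pb => aComb (la.getD (ia - 1) ' ') (lb.getD (ib - 1) ' ') ia ib prev pa pb)

def cellB (la lb : List Char) : Nat → Nat → Int :=
  pvCell (fun _ => 0) (fun _ => 0)
    (fun i j prev up left => if la.getD (i - 1) ' ' = lb.getD (j - 1) ' ' then prev + 1 else max up left)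

theorem aComb_proj (ca cb : Char) (ia ib : Nat)
    (prev pa pb : Int × String × String × List Int × List Int) :
    aComb ca cb ia ib prev pa pb =
      if ca = cb then
        if pa.1 = prev.1 + 1 ∧ pb.1 < prev.1 + 1 then
          (pa.1, pa.2.1.push ca, pa.2.2.1, pa.2.2.2.1 ++ [(ia : Int) - 1], pa.2.2.2.2)
        else if pb.1 = prev.1 + 1 ∧ pa.1 < prev.1 + 1 then
          (pb.1, pb.2.1, pb.2.2.1.push cb, pb.2.2.2.1, pb.2.2.2.2 ++ [(ib : Int) - 1])
        else (prev.1 + 1, prev.2.1, prev.2.2.1, prev.2.2.2.1, prev.2.2.2.2)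
      else
        if pa.1 > pb.1 then
          (pa.1, pa.2.1.push ca, pa.2.2.1, pa.2.2.2.1 ++ [(ia : Int) - 1], pa.2.2.2.2)
        else if pa.1 < pb.1 then
          (pb.1, pb.2.1, pb.2.2.1.push cb, pb.2.2.2.1, pb.2.2.2.2 ++ [(ib : Int) - 1])
        else
          if (ia : Int) - 1 ≥ (ib : Int) then
            (pa.1, pa.2.1.push ca, pa.2.2.1, pa.2.2.2.1 ++ [(ia : Int) - 1], pa.2.2.2.2)
          else (pb.1, pb.2.1, pb.2.2.1.push cb, pb.2.2.2.1, pb.2.2.2.2 ++ [(ib : Int) - 1]) := by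
  rcases prev with ⟨pl, ps, pt, px, py⟩
  rcases pa with ⟨al, sa, ta, xa, ya⟩
  rcases pb with ⟨bl, sb, tb, xb, yb⟩
  rfl

theorem cellA_zero (la lb : List Char) (j : Nat) :
    cellA la lb 0 j = (0, "", String.ofList (lb.take j), [], []) := by
  unfold cellA; rw [pvCell]; simp

theorem cellA_succ_zero (la lb : List Char) (i : Nat) :
    cellA la lb (i + 1) 0 = (0, String.ofList (la.take (i + 1)), "", [], []) := by
  unfold cellA; rw [pvCell]; simp

theorem cellA_succ_succ (la lb : List Char) (i j : Nat) :
    cellA la lb (i + 1) (j + 1) = aComb (la.getD i ' ') (lb.getD j ' ') (i + 1) (j + 1)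
      (cellA la lb i j) (cellA la lb i (j + 1)) (cellA la lb (i + 1) j) := by
  unfold cellA
  conv_lhs => rw [pvCell]
  simp

theorem cellB_zero (la lb : List Char) (j : Nat) : cellB la lb 0 j = 0 := by
  unfold cellB; rw [pvCell]; simp

theorem cellB_succ_zero (la lb : List Char) (i : Nat) : cellB la lb (i + 1) 0 = 0 := by
  unfold cellB; rw [pvCell]; simp

theorem cellB_succ_succ (la lb : List Char) (i j : Nat) :
    cellB la lb (i + 1) (j + 1) =
      if la.getD i ' ' = lb.getD j ' ' then cellB la lb i j + 1
      else max (cellB la lb i (j + 1)) (cellB la lb (i + 1) j) := by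
  unfold cellB
  conv_lhs => rw [pvCell]
  simp

theorem cellB_eq_fst (la lb : List Char) (i j : Nat) :
    cellB la lb i j = (cellA la lb i j).1 := by
  have main : ∀ (N i j : Nat), i + j ≤ N → cellB la lb i j = (cellA la lb i j).1 := by
    intro N
    induction N with
    | zero =>
      intro i j h
      have hi : i = 0 := by omega
      subst hi
      rw [cellB_zero, cellA_zero]
    | succ N ih =>
      intro i j h
      cases i with
      | zero => rw [cellB_zero, cellA_zero]
      | succ i =>
        cases j with
        | zero => rw [cellB_succ_zero, cellA_succ_zero]
        | succ j =>
          rw [cellB_succ_succ, cellA_succ_succ,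
            ih i j (by omega), ih i (j + 1) (by omega), ih (i + 1) j (by omega)]
          rcases h1 : cellA la lb i j with ⟨pl, ps, pt, px, py⟩
          rcases h2 : cellA la lb i (j + 1) with ⟨al, sa, ta, xa, ya⟩
          rcases h3 : cellA la lb (i + 1) j with ⟨bl, sb, tb, xb, yb⟩
          simp only [aComb]
          split_ifs <;> simp_all <;> omega
  exact main (i + j) i j (le_refl _)

theorem bRow_correct (la lb : List Char) (m i : Nat) (L : List (List Int))
    (hL : ∀ p q, p < i → q ≤ m → (L.getD p []).getD q 0 = cellB la lb p q) :
    ∀ k, k ≤ m + 1 →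
      ((List.range k).foldl (fun row j => row ++ [bVal la lb L row i j]) []).length = k ∧
      ∀ q, q < k →
        ((List.range k).foldl (fun row j => row ++ [bVal la lb L row i j]) []).getD q 0
          = cellB la lb i q := by
  intro k
  induction k with
  | zero => intro _; exact ⟨rfl, fun q hq => absurd hq (by omega)⟩
  | succ k ih =>
    intro hk
    obtain ⟨hlen, hval⟩ := ih (by omega)
    rw [List.range_succ, List.foldl_append, List.foldl_cons, List.foldl_nil]
    refine ⟨by simp [hlen], ?_⟩
    intro q hq
    by_cases hqk : q < k
    · rw [List.getD_append _ _ _ _ (by rw [hlen]; exact hqk)]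
      exact hval q hqk
    · have hqe : q = k := by omega
      subst hqe
      rw [List.getD_append_right _ _ _ _ (by rw [hlen]), hlen]
      simp only [Nat.sub_self, List.getD_cons_zero]
      rw [bVal]
      cases i with
      | zero =>
        rw [if_pos (Or.inl rfl), cellB_zero]
      | succ i =>
        cases q with
        | zero =>
          rw [if_pos (Or.inr rfl), cellB_succ_zero]
        | succ q =>
          rw [if_neg (by omega)]
          have e1 := hL i q (by omega) (by omega)
          have e2 := hL i (q + 1) (by omega) (by omega)
          have e3 := hval q (by omega)
          simp only [Nat.add_sub_cancel] at *
          rw [e1, e2, e3, cellB_succ_succ]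
          by_cases hca : la.getD i ' ' = lb.getD q ' '
          · rw [if_pos hca, if_pos hca]
          · rw [if_neg hca, if_neg hca]
            split_ifs <;> omega

theorem bTab_correct (la lb : List Char) (m : Nat) :
    ∀ r, ((List.range r).foldl (fun L i => L ++ [bRow la lb m L i]) []).length = r ∧
      ∀ p q, p < r → q ≤ m →
        (((List.range r).foldl (fun L i => L ++ [bRow la lb m L i]) []).getD p []).getD q 0
          = cellB la lb p q := by
  intro r
  induction r with
  | zero => exact ⟨rfl, fun p q hp _ => absurd hp (by omega)⟩
  | succ r ih =>
    obtain ⟨hlen, hval⟩ := ih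
    rw [show List.range (r + 1) = List.range r ++ [r] from List.range_succ,
      List.foldl_append, List.foldl_cons, List.foldl_nil]
    refine ⟨by simp [hlen], ?_⟩
    intro p q hp hq
    by_cases hpr : p < r
    · rw [List.getD_append _ _ _ _ (by rw [hlen]; exact hpr)]
      exact hval p q hpr hq
    · have hpe : p = r := by omega
      subst hpe
      rw [List.getD_append_right _ _ _ _ (by rw [hlen]), hlen]
      simp only [Nat.sub_self, List.getD_cons_zero]
      rw [bRow]
      exact (bRow_correct la lb m p _ hval (m + 1) (le_refl _)).2 q (by omega)

theorem bTab_getD (la lb : List Char) (n m : Nat) (p q : Nat) (hp : p ≤ n) (hq : q ≤ m) :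
    ((bTab la lb n m).getD p []).getD q 0 = cellB la lb p q := by
  rw [bTab]
  exact (bTab_correct la lb m (n + 1)).2 p q (by omega) hq

theorem btloop_correct (la lb : List Char) (L : List (List Int)) (n m : Nat)
    (hL : ∀ p q, p ≤ n → q ≤ m → (L.getD p []).getD q 0 = cellB la lb p q) :
    ∀ (N i j : Nat), i + j ≤ N → i ≤ n → j ≤ m → ∀ (sa sb : List Char) (xa xb : List Int),
    btFin la lb (btloop la lb L i j sa sb xa xb) =
      ((cellA la lb i j).2.1.toList ++ sa.reverse,
       (cellA la lb i j).2.2.1.toList ++ sb.reverse,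
       (cellA la lb i j).2.2.2.1 ++ xa.reverse,
       (cellA la lb i j).2.2.2.2 ++ xb.reverse) := by
  have base0 : ∀ j sa sb xa xb, btFin la lb (btloop la lb L 0 j sa sb xa xb) =
      ((cellA la lb 0 j).2.1.toList ++ sa.reverse,
       (cellA la lb 0 j).2.2.1.toList ++ sb.reverse,
       (cellA la lb 0 j).2.2.2.1 ++ xa.reverse,
       (cellA la lb 0 j).2.2.2.2 ++ xb.reverse) := by
    intro j sa sb xa xb
    rw [btloop, cellA_zero]
    simp [btFin]
  have base1 : ∀ i sa sb xa xb, btFin la lb (btloop la lb L (i + 1) 0 sa sb xa xb) =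
      ((cellA la lb (i + 1) 0).2.1.toList ++ sa.reverse,
       (cellA la lb (i + 1) 0).2.2.1.toList ++ sb.reverse,
       (cellA la lb (i + 1) 0).2.2.2.1 ++ xa.reverse,
       (cellA la lb (i + 1) 0).2.2.2.2 ++ xb.reverse) := by
    intro i sa sb xa xb
    rw [btloop, cellA_succ_zero]
    simp [btFin]
  intro N
  induction N with
  | zero =>
    intro i j h hi hj sa sb xa xb
    have h0 : i = 0 := by omega
    subst h0
    exact base0 j sa sb xa xb
  | succ N ih =>
    intro i j h hi hj sa sb xa xb
    cases i with
    | zero => exact base0 j sa sb xa xb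
    | succ i =>
      cases j with
      | zero => exact base1 i sa sb xa xb
      | succ j =>
        have hup : (L.getD i []).getD (j + 1) 0 = (cellA la lb i (j + 1)).1 := by
          rw [hL i (j + 1) (by omega) hj, cellB_eq_fst]
        have hleft : (L.getD (i + 1) []).getD j 0 = (cellA la lb (i + 1) j).1 := by
          rw [hL (i + 1) j hi (by omega), cellB_eq_fst]
        have hdiag : (L.getD i []).getD j 0 = (cellA la lb i j).1 := by
          rw [hL i j (by omega) (by omega), cellB_eq_fst]
        have hup_branch : btFin la lb (btloop la lb L i (j + 1) (sa ++ [la.getD i ' ']) sb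
              (xa ++ [(i : Int)]) xb) =
            (((cellA la lb i (j + 1)).2.1.push (la.getD i ' ')).toList ++ sa.reverse,
             (cellA la lb i (j + 1)).2.2.1.toList ++ sb.reverse,
             ((cellA la lb i (j + 1)).2.2.2.1 ++ [((i + 1 : Nat) : Int) - 1]) ++ xa.reverse,
             (cellA la lb i (j + 1)).2.2.2.2 ++ xb.reverse) := by
          rw [ih i (j + 1) (by omega) (by omega) hj]
          have hcast : ((i + 1 : Nat) : Int) - 1 = (i : Int) := by push_cast; ring
          rw [hcast]
          simp [String.toList_push]
        have hleft_branch : btFin la lb (btloop la lb L (i + 1) j sa (sb ++ [lb.getD j ' '])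
              xa (xb ++ [(j : Int)])) =
            ((cellA la lb (i + 1) j).2.1.toList ++ sa.reverse,
             ((cellA la lb (i + 1) j).2.2.1.push (lb.getD j ' ')).toList ++ sb.reverse,
             (cellA la lb (i + 1) j).2.2.2.1 ++ xa.reverse,
             ((cellA la lb (i + 1) j).2.2.2.2 ++ [((j + 1 : Nat) : Int) - 1]) ++ xb.reverse) := by
          rw [ih (i + 1) j (by omega) hi (by omega)]
          have hcast : ((j + 1 : Nat) : Int) - 1 = (j : Int) := by push_cast; ring
          rw [hcast]
          simp [String.toList_push]
        have hdiag_branch := ih i j (by omega) (by omega) (by omega) sa sb xa xb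
        have htie : (((i + 1 : Nat) : Int) - 1 ≥ ((j + 1 : Nat) : Int)) ↔ (j + 1 ≤ i) := by
          push_cast; omega
        rw [btloop, cellA_succ_succ, aComb_proj]
        simp only [hup, hleft, hdiag]
        by_cases hca : la.getD i ' ' = lb.getD j ' '
        · rw [if_pos hca, if_pos hca]
          by_cases h1 : (cellA la lb i (j + 1)).1 = (cellA la lb i j).1 + 1 ∧
              (cellA la lb (i + 1) j).1 < (cellA la lb i j).1 + 1
          · rw [if_pos h1, if_pos h1]
            exact hup_branch
          · rw [if_neg h1, if_neg h1]
            by_cases h2 : (cellA la lb (i + 1) j).1 = (cellA la lb i j).1 + 1 ∧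
                (cellA la lb i (j + 1)).1 < (cellA la lb i j).1 + 1
            · rw [if_pos h2, if_pos h2]
              exact hleft_branch
            · rw [if_neg h2, if_neg h2]
              exact hdiag_branch
        · rw [if_neg hca, if_neg hca]
          by_cases h3 : (cellA la lb i (j + 1)).1 > (cellA la lb (i + 1) j).1
          · rw [if_pos h3, if_pos h3]
            exact hup_branch
          · rw [if_neg h3, if_neg h3]
            by_cases h4 : (cellA la lb i (j + 1)).1 < (cellA la lb (i + 1) j).1
            · rw [if_pos h4, if_pos h4]
              exact hleft_branch
            · rw [if_neg h4, if_neg h4]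
              by_cases h5 : j + 1 ≤ i
              · rw [if_pos h5, if_pos (htie.mpr h5)]
                exact hup_branch
              · rw [if_neg h5, if_neg (fun hc => h5 (htie.mp hc))]
                exact hleft_branch

-- ===== VERDICT (by name: the statement is the Claim_ definition above) =====
theorem diff_spec : Claim_equal_diff := by
  intro a b _ hpre
  have ha : a.toList ≠ [] := by
    intro hnil
    apply hpre.1
    have h : a = String.ofList a.toList := String.ofList_toList.symm
    rw [hnil] at h
    exact h
  have hb : b.toList ≠ [] := by
    intro hnil
    apply hpre.2
    have h : b = String.ofList b.toList := String.ofList_toList.symm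
    rw [hnil] at h
    exact h
  have hla : 1 ≤ a.toList.length := by
    cases h : a.toList with
    | nil => exact absurd h ha
    | cons x xs => simp
  have hlb : 1 ≤ b.toList.length := by
    cases h : b.toList with
    | nil => exact absurd h hb
    | cons x xs => simp
  have hLcell : ∀ p q, p ≤ a.toList.length - 1 → q ≤ b.toList.length - 1 →
      ((bTab a.toList b.toList (a.toList.length - 1) (b.toList.length - 1)).getD p []).getD q 0
        = cellB a.toList b.toList p q := by
    intro p q hp hq
    exact bTab_getD _ _ _ _ _ _ hp hq
  have hd1 : diff a b = cellA a.toList b.toList (a.toList.length - 1) (b.toList.length - 1) := by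
    simp only [diff]
    rw [pvTab_getD _ _ _ _ _ _ _ _ (by omega) (by omega)]
    rfl
  have hbt := btloop_correct a.toList b.toList _ (a.toList.length - 1) (b.toList.length - 1) hLcell
    ((a.toList.length - 1) + (b.toList.length - 1)) (a.toList.length - 1) (b.toList.length - 1)
    (le_refl _) (le_refl _) (le_refl _) [] [] [] []
  have hd2 : diff_alt a b = cellA a.toList b.toList (a.toList.length - 1) (b.toList.length - 1) := by
    simp only [diff_alt]
    rw [hbt, hLcell _ _ (le_refl _) (le_refl _), cellB_eq_fst]
    rcases h : cellA a.toList b.toList (a.toList.length - 1) (b.toList.length - 1) with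
      ⟨l0, s1, s2, x1, x2⟩
    simp
  show diff a b = diff_alt a b
  rw [hd1, hd2]
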